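-- pv_equiv track=rewrite | github.com/rvaughan/AdventOfCode2017 | 2023/day_07/solution_p2.py | sort_hands
-- ===== SOURCE A (Python) =====
-- def hand_2_better(hand_1, hand_2):
--     face_cards = ['Q', 'K', 'A', 'T']
--
--     # Check each card in turn
--     for c_1, c_2 in zip(hand_1, hand_2):
--         if c_1 == 'J':
--             c_1 = '1'
--         if c_2 == 'J':
--             c_2 = '1'
--
--         if c_1 in face_cards and c_2 in face_cards:
--             if c_1 == 'A' and c_2 != 'A':
--                 return False
--             if c_1 != 'A' and c_2 == 'A':
--                 return True
--             if c_1 == 'K' and c_2 != 'K':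
--                 return False
--             if c_1 != 'K' and c_2 == 'K':
--                 return True
--             if c_1 == 'Q' and c_2 != 'Q':
--                 return False
--             if c_1 != 'Q' and c_2 == 'Q':
--                 return True
--             if c_1 == 'T' and c_2 != 'T':
--                 return False
--             if c_1 != 'T' and c_2 == 'T':
--                 return True
--         elif c_1 in face_cards and c_2 not in face_cards:
--             return False
--         elif c_1 not in face_cards and c_2 in face_cards:
--             return True
--         elif c_1 > c_2:
--             return False
--         elif c_1 < c_2:
--             return True
--
--     return False
--
-- def sort_hands(hands):
--     sorted_hands = hands.copy()
--     changes = True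
--     max = len(sorted_hands)
--     while changes:
--         # Bubble sort...
--         for i in range(max-1):
--             if hand_2_better(sorted_hands[i], sorted_hands[i+1]):
--                 swap = sorted_hands[i]
--                 sorted_hands[i] = sorted_hands[i+1]
--                 sorted_hands[i+1] = swap
--                 changes = True
--
--         if not changes:
--             break
--
--         max -= 1
--         if max == 0:
--             break
--
--     return sorted_hands
-- ===== SOURCE B (Python) =====
-- def sort_hands(hands):
--     FACE_RANK = {'T': 0x110000, 'Q': 0x110001, 'K': 0x110002, 'A': 0x110003}
--
--     def card_rank(c):
--         if c == 'J':
--             return ord('1')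
--         return FACE_RANK.get(c, ord(c))
--
--     return sorted(hands, key=lambda hand: [card_rank(c) for c in hand], reverse=True)
-- ===== Notes on version B (the rewrite author's own statement) =====
-- stated objective: faster
-- what changed: Replaces the bubble sort with a hand-written pairwise card comparator by computing a numeric rank key per hand once and doing a single stable key-sort (sorted(..., key=..., reverse=True)).
-- outside the precondition, e.g. on sort_hands([]): A does not finish within the time limit, B returns []; on sort_hands(['A', 'AA']): A returns ['A', 'AA'], B returns ['AA', 'A']
import Mathlib
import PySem

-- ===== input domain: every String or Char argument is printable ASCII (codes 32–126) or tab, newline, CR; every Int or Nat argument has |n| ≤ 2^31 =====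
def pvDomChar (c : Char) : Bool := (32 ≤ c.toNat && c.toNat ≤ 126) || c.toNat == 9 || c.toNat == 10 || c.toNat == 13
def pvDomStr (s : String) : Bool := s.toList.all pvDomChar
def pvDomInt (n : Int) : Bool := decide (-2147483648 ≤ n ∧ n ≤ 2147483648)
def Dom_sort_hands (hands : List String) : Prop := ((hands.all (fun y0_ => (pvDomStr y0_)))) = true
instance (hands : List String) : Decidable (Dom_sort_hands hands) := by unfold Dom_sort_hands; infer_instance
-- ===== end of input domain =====

-- B replaces A's bubble sort with a per-hand numeric sort key and one stable key-sort
-- (idiomatic/faster); equivalence is about the return value only (A does not mutate its argument).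

-- ===== PORT A =====
def pvFaces : List Char := ['Q', 'K', 'A', 'T']

-- the `for c_1, c_2 in zip(hand_1, hand_2)` loop of hand_2_better, step for step
def pvH2bLoop : List (Char × Char) → Bool
  | [] => false
  | (a, b) :: rest =>
    let c1 := if a = 'J' then '1' else a
    let c2 := if b = 'J' then '1' else b
    if c1 ∈ pvFaces ∧ c2 ∈ pvFaces then
      if c1 = 'A' ∧ c2 ≠ 'A' then false
      else if c1 ≠ 'A' ∧ c2 = 'A' then true
      else if c1 = 'K' ∧ c2 ≠ 'K' then false
      else if c1 ≠ 'K' ∧ c2 = 'K' then true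
      else if c1 = 'Q' ∧ c2 ≠ 'Q' then false
      else if c1 ≠ 'Q' ∧ c2 = 'Q' then true
      else if c1 = 'T' ∧ c2 ≠ 'T' then false
      else if c1 ≠ 'T' ∧ c2 = 'T' then true
      else pvH2bLoop rest
    else if c1 ∈ pvFaces ∧ c2 ∉ pvFaces then false
    else if c1 ∉ pvFaces ∧ c2 ∈ pvFaces then true
    else if c2 < c1 then false      -- Python `c_1 > c_2` on 1-char strings: codepoint order
    else if c1 < c2 then true
    else pvH2bLoop rest

def hand_2_better (hand_1 hand_2 : String) : Bool :=
  pvH2bLoop (hand_1.toList.zip hand_2.toList)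

-- one `for i in range(max-1)` pass of adjacent compare-and-swap (m = max-1 comparisons)
def pvBubblePass : List String → Nat → List String
  | xs, 0 => xs
  | [], _ + 1 => []
  | [x], _ + 1 => [x]
  | x :: y :: t, m + 1 =>
    if hand_2_better x y then y :: pvBubblePass (x :: t) m
    else x :: pvBubblePass (y :: t) m

-- the `while` loop: `changes` is never set False, so it runs passes until max == 0
def pvBubbleLoop : List String → Nat → List String
  | xs, 0 => xs
  | xs, m + 1 => pvBubbleLoop (pvBubblePass xs m) m

def sort_hands (hands : List String) : List String :=
  pvBubbleLoop hands hands.length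

-- ===== PORT B =====
-- card_rank: FACE_RANK.get(c, ord(c)) ported as the equivalent literal-dict lookup chain
def pvCardRank (c : Char) : Nat :=
  if c = 'J' then 49
  else if c = 'T' then 1114112
  else if c = 'Q' then 1114113
  else if c = 'K' then 1114114
  else if c = 'A' then 1114115
  else c.toNat

def pvHandKey (s : String) : List Nat := s.toList.map pvCardRank

def sort_hands_alt (hands : List String) : List String :=
  PySem.List.sorted hands pvHandKey true

-- ===== PRECONDITION & SPEC =====
-- Pre_ excludes (a) the empty list, on which A's `while` loop never terminates, and (b) lists in
-- which some earlier hand's rank-key sequence is a proper prefix of a later hand's: A's comparator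
-- treats such pairs as ties (their input order is kept, an accident of the bubble passes), while a
-- tuple-key sort must place the longer key first; when every such pair already has the longer key
-- first the two orders coincide, so those lists stay inside Pre_.
def Pre_sort_hands (hands : List String) : Prop :=
  hands ≠ [] ∧
    hands.Pairwise (fun a b => pvHandKey a <+: pvHandKey b → pvHandKey a = pvHandKey b)
instance (hands : List String) : Decidable (Pre_sort_hands hands) := by
  unfold Pre_sort_hands; infer_instance

def pvWitness_sort_hands : List String := ["32T3K", "T55J5", "KK677", "KTJJT", "QQQJA"]

def Spec_sort_hands (hands : List String) (out : List String) : Prop := out = sort_hands_alt hands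
instance (hands : List String) (out : List String) : Decidable (Spec_sort_hands hands out) := by
  unfold Spec_sort_hands; infer_instance

-- ===== CLAIM (what is proved, stated in full; the proofs are below) =====
def Claim_equal_sort_hands : Prop :=
  ∀ (hands : List String), Dom_sort_hands hands → Pre_sort_hands hands →
    Spec_sort_hands hands (sort_hands hands)


-- ===== LEMMAS AND PROOFS =====

theorem pvChar_toNat_lt (c : Char) : c.toNat < 1114112 := by
  have h := c.valid
  unfold UInt32.isValidChar Nat.isValidChar at h
  have he : c.toNat = c.val.toNat := rfl
  rcases h with h1 | ⟨_, h1⟩ <;> omega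

theorem pvCardRank_nonface (c : Char) (hJ : c ≠ 'J') (hf : c ∉ pvFaces) :
    pvCardRank c = c.toNat := by
  simp only [pvFaces, List.mem_cons, List.not_mem_nil, or_false, not_or] at hf
  simp [pvCardRank, hJ, hf.1, hf.2.1, hf.2.2]

theorem pvCardRank_jmap (c : Char) : pvCardRank (if c = 'J' then '1' else c) = pvCardRank c := by
  by_cases h : c = 'J' <;> simp [h, pvCardRank]

-- the inner-body step lemma, stated on the jmapped chars

theorem pvStep (c1 c2 : Char) (h1 : c1 ≠ 'J') (h2 : c2 ≠ 'J') (k : Bool) :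
    (if c1 ∈ pvFaces ∧ c2 ∈ pvFaces then
      if c1 = 'A' ∧ c2 ≠ 'A' then false
      else if c1 ≠ 'A' ∧ c2 = 'A' then true
      else if c1 = 'K' ∧ c2 ≠ 'K' then false
      else if c1 ≠ 'K' ∧ c2 = 'K' then true
      else if c1 = 'Q' ∧ c2 ≠ 'Q' then false
      else if c1 ≠ 'Q' ∧ c2 = 'Q' then true
      else if c1 = 'T' ∧ c2 ≠ 'T' then false
      else if c1 ≠ 'T' ∧ c2 = 'T' then true
      else k
    else if c1 ∈ pvFaces ∧ c2 ∉ pvFaces then false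
    else if c1 ∉ pvFaces ∧ c2 ∈ pvFaces then true
    else if c2 < c1 then false
    else if c1 < c2 then true
    else k) =
      (if pvCardRank c1 < pvCardRank c2 then true
       else if pvCardRank c2 < pvCardRank c1 then false
       else k) := by
  by_cases hf1 : c1 ∈ pvFaces <;> by_cases hf2 : c2 ∈ pvFaces
  · simp only [pvFaces, List.mem_cons, List.not_mem_nil, or_false] at hf1 hf2
    rcases hf1 with h | h | h | h <;> rcases hf2 with g | g | g | g <;>
      subst h <;> subst g <;> simp [pvCardRank, pvFaces]
  · have hb : pvCardRank c2 < pvCardRank c1 := by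
      rw [pvCardRank_nonface c2 h2 hf2]
      have := pvChar_toNat_lt c2
      simp only [pvFaces, List.mem_cons, List.not_mem_nil, or_false] at hf1
      rcases hf1 with h | h | h | h <;> subst h <;> simp [pvCardRank] <;> omega
    simp [hf1, hf2, hb, Nat.lt_asymm hb]
  · have hb : pvCardRank c1 < pvCardRank c2 := by
      rw [pvCardRank_nonface c1 h1 hf1]
      have := pvChar_toNat_lt c1
      simp only [pvFaces, List.mem_cons, List.not_mem_nil, or_false] at hf2
      rcases hf2 with h | h | h | h <;> subst h <;> simp [pvCardRank] <;> omega
    simp [hf1, hf2, hb]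
  · rw [pvCardRank_nonface c1 h1 hf1, pvCardRank_nonface c2 h2 hf2]
    have hlt : ∀ a b : Char, (a < b) ↔ a.toNat < b.toNat := by
      intro a b
      exact ⟨fun h => UInt32.lt_iff_toNat_lt.mp h, fun h => UInt32.lt_iff_toNat_lt.mpr h⟩
    rw [if_neg (fun hc => hf1 hc.1), if_neg (fun hc => hf1 hc.1), if_neg (fun hc => hf2 hc.2)]
    simp only [hlt]
    split_ifs <;> first | rfl | omega

theorem pvH2bLoop_cons (a b : Char) (rest : List (Char × Char)) :
    pvH2bLoop ((a, b) :: rest) =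
      if pvCardRank a < pvCardRank b then true
      else if pvCardRank b < pvCardRank a then false
      else pvH2bLoop rest := by
  have hj1 : (if a = 'J' then '1' else a) ≠ 'J' := by
    by_cases h : a = 'J' <;> simp [h]
  have hj2 : (if b = 'J' then '1' else b) ≠ 'J' := by
    by_cases h : b = 'J' <;> simp [h]
  have := pvStep (if a = 'J' then '1' else a) (if b = 'J' then '1' else b) hj1 hj2
    (pvH2bLoop rest)
  rw [pvCardRank_jmap, pvCardRank_jmap] at this
  exact this

theorem pvH2bLoop_eq_lt (l1 l2 : List Char)
    (h12 : l1.map pvCardRank <+: l2.map pvCardRank → l1.map pvCardRank = l2.map pvCardRank) :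
    pvH2bLoop (l1.zip l2) = decide (l1.map pvCardRank < l2.map pvCardRank) := by
  induction l1 generalizing l2 with
  | nil =>
    cases l2 with
    | nil => simp [pvH2bLoop]
    | cons y t2 =>
      exact absurd (h12 (List.nil_prefix)) (by simp)
  | cons x t1 ih =>
    cases l2 with
    | nil =>
      simp only [List.zip_nil_right, List.map_nil, List.map_cons]
      simp [pvH2bLoop, List.not_lt_nil]
    | cons y t2 =>
      simp only [List.zip_cons_cons, List.map_cons]
      rw [pvH2bLoop_cons]
      rcases Nat.lt_trichotomy (pvCardRank x) (pvCardRank y) with h | h | h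
      · simp [h, List.cons_lt_cons_iff]
      · have hnl : ¬ pvCardRank x < pvCardRank y := by omega
        have hng : ¬ pvCardRank y < pvCardRank x := by omega
        rw [if_neg hnl, if_neg hng]
        have h12' : t1.map pvCardRank <+: t2.map pvCardRank → t1.map pvCardRank = t2.map pvCardRank := by
          intro hp
          have heq := h12 (by
            simp only [List.map_cons]
            exact List.cons_prefix_cons.mpr ⟨h, hp⟩)
          simp only [List.map_cons] at heq
          exact (List.cons.inj heq).2
        have hiff : (pvCardRank x :: t1.map pvCardRank < pvCardRank y :: t2.map pvCardRank) ↔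
            (t1.map pvCardRank < t2.map pvCardRank) := by
          rw [List.cons_lt_cons_iff]
          constructor
          · rintro (h' | ⟨_, h'⟩)
            · omega
            · exact h'
          · intro h'
            exact Or.inr ⟨h, h'⟩
        rw [ih t2 h12']
        exact (decide_eq_decide.mpr hiff).symm
      · have hnl : ¬ pvCardRank x < pvCardRank y := by omega
        simp only [if_neg hnl, if_pos h]
        have : ¬ (pvCardRank x :: t1.map pvCardRank < pvCardRank y :: t2.map pvCardRank) := by
          rw [List.cons_lt_cons_iff]
          rintro (h' | ⟨he, _⟩) <;> omega
        simp [this]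

-- the strict "must precede" order of the stable descending sort, on index-tagged hands
def pvGood (x y : String × Nat) : Prop :=
  pvHandKey y.1 < pvHandKey x.1 ∨ (pvHandKey x.1 = pvHandKey y.1 ∧ x.2 < y.2)

def pvSt (l : List (String × Nat)) : Prop :=
  l.Pairwise (fun x y => pvHandKey x.1 = pvHandKey y.1 → x.2 < y.2)

def pvCmp (x y : String × Nat) : Bool := decide (pvHandKey x.1 < pvHandKey y.1)

def pvC (x y : String × Nat) : Prop := hand_2_better x.1 y.1 = pvCmp x y

def pvIPass : List (String × Nat) → Nat → List (String × Nat)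
  | xs, 0 => xs
  | [], _ + 1 => []
  | [x], _ + 1 => [x]
  | x :: y :: t, m + 1 =>
    if pvCmp x y then y :: pvIPass (x :: t) m
    else x :: pvIPass (y :: t) m

def pvILoop : List (String × Nat) → Nat → List (String × Nat)
  | xs, 0 => xs
  | xs, m + 1 => pvILoop (pvIPass xs m) m

theorem pvH2bLoop_mirror (l1 l2 : List Char) (h : pvH2bLoop (l1.zip l2) = true) :
    pvH2bLoop (l2.zip l1) = false := by
  induction l1 generalizing l2 with
  | nil => rw [List.zip_nil_left] at h; exact absurd h (by simp [pvH2bLoop])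
  | cons x t1 ih =>
    cases l2 with
    | nil => simp [pvH2bLoop]
    | cons y t2 =>
      rw [List.zip_cons_cons, pvH2bLoop_cons] at h
      rw [List.zip_cons_cons, pvH2bLoop_cons]
      rcases Nat.lt_trichotomy (pvCardRank x) (pvCardRank y) with h' | h' | h'
      · rw [if_neg (by omega), if_pos h']
      · rw [if_neg (by omega), if_neg (by omega)] at h
        rw [if_neg (by omega), if_neg (by omega)]
        exact ih t2 h
      · rw [if_neg (by omega), if_pos h'] at h
        exact absurd h (by simp)

theorem pvC_swap {p q : String × Nat} (hc : pvC p q) (ht : pvCmp p q = true) : pvC q p := by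
  have hlt : pvHandKey p.1 < pvHandKey q.1 := of_decide_eq_true ht
  have h2b : pvH2bLoop (p.1.toList.zip q.1.toList) = true := (hc.trans ht)
  unfold pvC hand_2_better pvCmp
  rw [pvH2bLoop_mirror _ _ h2b]
  symm
  apply decide_eq_false
  intro h'
  exact absurd (List.lt_trans hlt h') (lt_irrefl _)

theorem pvGood_trans {x y z : String × Nat} (h1 : pvGood x y) (h2 : pvGood y z) : pvGood x z := by
  rcases h1 with h1 | ⟨e1, i1⟩ <;> rcases h2 with h2 | ⟨e2, i2⟩
  · exact Or.inl (List.lt_trans h2 h1)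
  · exact Or.inl (e2 ▸ h1)
  · exact Or.inl (e1 ▸ h2)
  · exact Or.inr ⟨e1.trans e2, Nat.lt_trans i1 i2⟩

theorem pvGood_asymm {x y : String × Nat} (h1 : pvGood x y) (h2 : pvGood y x) : False := by
  rcases h1 with h1 | ⟨e1, i1⟩ <;> rcases h2 with h2 | ⟨e2, i2⟩
  · exact (lt_self_iff_false _).mp (List.lt_trans h1 h2)
  · exact (lt_self_iff_false _).mp (e2 ▸ h1)
  · exact (lt_self_iff_false _).mp (e1 ▸ h2)
  · omega

theorem pvIPass_perm (m : Nat) (l : List (String × Nat)) : (pvIPass l m).Perm l := by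
  induction m generalizing l with
  | zero => simp [pvIPass]
  | succ m ih =>
    match l with
    | [] => simp [pvIPass]
    | [x] => simp [pvIPass]
    | x :: y :: t =>
      rw [pvIPass]
      split
      · exact ((ih (x :: t)).cons y).trans (List.Perm.swap x y t)
      · exact (ih (y :: t)).cons x

theorem pvILoop_perm (n : Nat) (l : List (String × Nat)) : (pvILoop l n).Perm l := by
  induction n generalizing l with
  | zero => simp [pvILoop]
  | succ n ih => exact (ih (pvIPass l n)).trans (pvIPass_perm n l)

theorem pvIPass_St (m : Nat) (l : List (String × Nat)) (h : pvSt l) : pvSt (pvIPass l m) := by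
  induction m generalizing l with
  | zero => simpa [pvIPass] using h
  | succ m ih =>
    match l with
    | [] => simpa [pvIPass] using h
    | [x] => simpa [pvIPass] using h
    | x :: y :: t =>
      rw [pvIPass]
      unfold pvSt at h ⊢
      rw [List.pairwise_cons] at h
      obtain ⟨hx, h'⟩ := h
      rw [List.pairwise_cons] at h'
      obtain ⟨hy, ht⟩ := h'
      split
      · rename_i hc
        have hxy : pvHandKey x.1 < pvHandKey y.1 := of_decide_eq_true hc
        refine List.Pairwise.cons ?_ (ih (x :: t) ?_)
        · intro z hz he
          have hz' : z ∈ x :: t := ((pvIPass_perm m (x :: t)).mem_iff).mp hz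
          rcases List.mem_cons.mp hz' with hzx | hz'
          · rw [hzx] at he
            exact absurd hxy (by rw [he]; exact lt_irrefl _)
          · exact hy z hz' he
        · exact List.Pairwise.cons (fun z hz he => hx z (List.mem_cons_of_mem y hz) he) ht
      · refine List.Pairwise.cons ?_ (ih (y :: t) ?_)
        · intro z hz he
          have hz' : z ∈ y :: t := ((pvIPass_perm m (y :: t)).mem_iff).mp hz
          rcases List.mem_cons.mp hz' with hzy | hz'
          · rw [hzy] at he ⊢
            exact hx y List.mem_cons_self he
          · exact hx z (List.mem_cons_of_mem y hz') he
        · exact List.Pairwise.cons (fun z hz he => hy z hz he) ht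

theorem pvIPass_split (m : Nat) (a b : List (String × Nat)) (h : a.length = m + 1) :
    pvIPass (a ++ b) m = pvIPass a m ++ b := by
  induction m generalizing a b with
  | zero =>
    match a with
    | [x] => simp [pvIPass]
  | succ m ih =>
    match a, h with
    | x :: y :: t, h =>
      have ht : (y :: t).length = m + 1 := by simpa using h
      simp only [List.cons_append, pvIPass]
      split
      · rw [show x :: (t ++ b) = (x :: t) ++ b from rfl, ih (x :: t) b (by simpa using h)]
        simp
      · rw [show y :: (t ++ b) = (y :: t) ++ b from rfl, ih (y :: t) b ht]
        simp

theorem pvIPass_last (m : Nat) (l : List (String × Nat)) (hl : l.length = m + 1) (hst : pvSt l) :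
    ∃ init z, pvIPass l m = init ++ [z] ∧ ∀ u ∈ init, pvGood u z := by
  induction m generalizing l with
  | zero =>
    match l with
    | [x] => exact ⟨[], x, by simp [pvIPass], by simp⟩
  | succ m ih =>
    match l with
    | x :: y :: t =>
      unfold pvSt at hst
      rw [List.pairwise_cons] at hst
      obtain ⟨hx, hst'⟩ := hst
      rw [pvIPass]
      split
      · rename_i hc
        have hxy : pvHandKey x.1 < pvHandKey y.1 := of_decide_eq_true hc
        have hst2 : pvSt (x :: t) := by
          unfold pvSt
          rw [List.pairwise_cons] at hst' ⊢
          exact ⟨fun z hz => hx z (List.mem_cons_of_mem y hz), hst'.2⟩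
        obtain ⟨init, z, heq, hgood⟩ := ih (x :: t) (by simpa using hl) hst2
        refine ⟨y :: init, z, by rw [heq]; rfl, ?_⟩
        intro u hu
        rcases List.mem_cons.mp hu with hu | hu
        · subst hu
          have hyx : pvGood u x := Or.inl hxy
          have hxmem : x ∈ init ++ [z] := by
            rw [← heq]
            exact ((pvIPass_perm m (x :: t)).mem_iff).mpr List.mem_cons_self
          rcases List.mem_append.mp hxmem with hxi | hxz
          · exact pvGood_trans hyx (hgood x hxi)
          · rw [List.mem_singleton.mp hxz] at hyx
            exact hyx
        · exact hgood u hu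
      · rename_i hc
        have hnxy : ¬ pvHandKey x.1 < pvHandKey y.1 := of_decide_eq_false (Bool.of_not_eq_true hc)
        have hgxy : pvGood x y := by
          rcases lt_trichotomy (pvHandKey x.1) (pvHandKey y.1) with h' | h' | h'
          · exact absurd h' hnxy
          · exact Or.inr ⟨h', hx y List.mem_cons_self h'⟩
          · exact Or.inl h'
        have hst2 : pvSt (y :: t) := hst'
        obtain ⟨init, z, heq, hgood⟩ := ih (y :: t) (by simpa using hl) hst2
        refine ⟨x :: init, z, by rw [heq]; rfl, ?_⟩
        intro u hu
        rcases List.mem_cons.mp hu with hu | hu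
        · subst hu
          have hymem : y ∈ init ++ [z] := by
            rw [← heq]
            exact ((pvIPass_perm m (y :: t)).mem_iff).mpr List.mem_cons_self
          rcases List.mem_append.mp hymem with hyi | hyz
          · exact pvGood_trans hgxy (hgood y hyi)
          · rw [List.mem_singleton.mp hyz] at hgxy
            exact hgxy
        · exact hgood u hu

theorem pvILoop_sorted (n : Nat) (l suf : List (String × Nat)) (hl : l.length = n)
    (hst : pvSt l) (hcross : ∀ u ∈ l, ∀ v ∈ suf, pvGood u v) (hsuf : suf.Pairwise pvGood) :
    (pvILoop (l ++ suf) n).Pairwise pvGood := by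
  induction n generalizing l suf with
  | zero =>
    match l, hl with
    | [], _ => simpa [pvILoop] using hsuf
  | succ n ih =>
    rw [pvILoop, pvIPass_split n l suf hl]
    obtain ⟨init, z, heq, hgood⟩ := pvIPass_last n l hl hst
    rw [heq]
    have hperm : (init ++ [z]).Perm l := heq ▸ pvIPass_perm n l
    have hinitlen : init.length = n := by
      have := hperm.length_eq
      simp only [List.length_append, List.length_cons, List.length_nil] at this
      omega
    have hstp : pvSt (init ++ [z]) := heq ▸ pvIPass_St n l hst
    have hstinit : pvSt init := by
      unfold pvSt at hstp ⊢
      exact hstp.sublist (List.sublist_append_left init [z])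
    have hzmem : z ∈ l := hperm.mem_iff.mp (by simp)
    have hinitsub : ∀ u ∈ init, u ∈ l := fun u hu => hperm.mem_iff.mp (by simp [hu])
    have := ih init (z :: suf) hinitlen hstinit
      (by
        intro u hu v hv
        rcases List.mem_cons.mp hv with hv | hv
        · subst hv; exact hgood u hu
        · exact hcross u (hinitsub u hu) v hv)
      (List.Pairwise.cons (fun v hv => hcross z hzmem v hv) hsuf)
    simpa using this

theorem pvIPass_sim (m : Nat) (l : List (String × Nat)) (h : l.Pairwise pvC) :
    pvBubblePass (l.map Prod.fst) m = (pvIPass l m).map Prod.fst ∧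
      (pvIPass l m).Pairwise pvC := by
  induction m generalizing l with
  | zero => exact ⟨by simp [pvBubblePass, pvIPass], by rw [pvIPass]; exact h⟩
  | succ m ih =>
    match l with
    | [] => exact ⟨by simp [pvBubblePass, pvIPass], by simp [pvIPass]⟩
    | [x] => exact ⟨by simp [pvBubblePass, pvIPass], by simp [pvIPass]⟩
    | x :: y :: t =>
      rw [List.pairwise_cons] at h
      obtain ⟨hx, h'⟩ := h
      rw [List.pairwise_cons] at h'
      obtain ⟨hy, ht⟩ := h'
      have hCxy : pvC x y := hx y List.mem_cons_self
      simp only [List.map_cons, pvBubblePass, pvIPass]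
      rw [hCxy]
      by_cases hcm : pvCmp x y = true
      · simp only [hcm, if_true]
        have hpw : (x :: t).Pairwise pvC :=
          List.Pairwise.cons (fun z hz => hx z (List.mem_cons_of_mem y hz)) ht
        obtain ⟨hmap, hpw'⟩ := ih (x :: t) hpw
        constructor
        · rw [show (x.1 :: t.map Prod.fst) = (x :: t).map Prod.fst from rfl, hmap]
          rfl
        · refine List.Pairwise.cons ?_ hpw'
          intro z hz
          rcases List.mem_cons.mp ((pvIPass_perm m (x :: t)).mem_iff.mp hz) with hzx | hzt
          · rw [hzx]
            exact pvC_swap hCxy hcm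
          · exact hy z hzt
      · simp only [Bool.of_not_eq_true hcm, Bool.false_eq_true, if_false]
        have hpw : (y :: t).Pairwise pvC := List.Pairwise.cons hy ht
        obtain ⟨hmap, hpw'⟩ := ih (y :: t) hpw
        constructor
        · rw [show (y.1 :: t.map Prod.fst) = (y :: t).map Prod.fst from rfl, hmap]
          rfl
        · refine List.Pairwise.cons ?_ hpw'
          intro z hz
          rcases List.mem_cons.mp ((pvIPass_perm m (y :: t)).mem_iff.mp hz) with hzy | hzt
          · rw [hzy]
            exact hCxy
          · exact hx z (List.mem_cons_of_mem y hzt)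

theorem pvILoop_sim (n : Nat) (l : List (String × Nat)) (h : l.Pairwise pvC) :
    pvBubbleLoop (l.map Prod.fst) n = (pvILoop l n).map Prod.fst := by
  induction n generalizing l with
  | zero => simp [pvBubbleLoop, pvILoop]
  | succ n ih =>
    rw [pvBubbleLoop, pvILoop]
    obtain ⟨hmap, hpw⟩ := pvIPass_sim n l h
    rw [hmap]
    exact ih (pvIPass l n) hpw

theorem pvZipIdx_pairwise_rel (R : String → String → Prop) (xs : List String)
    (h : xs.Pairwise R) (k : Nat) : (xs.zipIdx k).Pairwise (fun p q => R p.1 q.1) := by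
  induction xs generalizing k with
  | nil => simp
  | cons x t ih =>
    rw [List.pairwise_cons] at h
    rw [List.zipIdx_cons]
    refine List.Pairwise.cons ?_ (ih h.2 (k + 1))
    intro q hq
    have h1 : q.1 ∈ (t.zipIdx (k + 1)).map Prod.fst := List.mem_map_of_mem hq
    rw [List.zipIdx_map_fst] at h1
    exact h.1 q.1 h1

theorem pvInsert_good (x : String × Nat) (acc : List (String × Nat))
    (hpw : acc.Pairwise pvGood) (hidx : ∀ p ∈ acc, p.2 < x.2) :
    (PySem.List.insertBy (fun a b => decide (pvHandKey b.1 < pvHandKey a.1)) x acc).Pairwise pvGood := by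
  induction acc with
  | nil => simp [PySem.List.insertBy]
  | cons y ys ih =>
    rw [List.pairwise_cons] at hpw
    obtain ⟨hy, hys⟩ := hpw
    rw [PySem.List.insertBy]
    split
    · rename_i hc
      have hlt : pvHandKey y.1 < pvHandKey x.1 := of_decide_eq_true hc
      refine List.Pairwise.cons ?_ (List.Pairwise.cons hy hys)
      intro z hz
      rcases List.mem_cons.mp hz with hz | hz
      · subst hz; exact Or.inl hlt
      · exact pvGood_trans (Or.inl hlt) (hy z hz)
    · rename_i hc
      have hnlt : ¬ pvHandKey y.1 < pvHandKey x.1 := of_decide_eq_false (Bool.of_not_eq_true hc)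
      refine List.Pairwise.cons ?_ (ih hys (fun p hp => hidx p (by simp [hp])))
      intro z hz
      rcases (PySem.List.mem_insertBy _ x z ys).mp hz with hz | hz
      · subst hz
        rcases lt_trichotomy (pvHandKey y.1) (pvHandKey z.1) with h' | h' | h'
        · exact absurd h' hnlt
        · exact Or.inr ⟨h', hidx y List.mem_cons_self⟩
        · exact Or.inl h'
      · exact hy z hz

theorem pvFoldl_good (l acc : List (String × Nat)) (hpw : acc.Pairwise pvGood)
    (hl : l.Pairwise (fun p q => p.2 < q.2)) (hcross : ∀ p ∈ acc, ∀ q ∈ l, p.2 < q.2) :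
    (l.foldl (fun acc x =>
        PySem.List.insertBy (fun a b => decide (pvHandKey b.1 < pvHandKey a.1)) x acc) acc).Pairwise pvGood := by
  induction l generalizing acc with
  | nil => simpa using hpw
  | cons x t ih =>
    rw [List.pairwise_cons] at hl
    obtain ⟨hxl, htl⟩ := hl
    simp only [List.foldl_cons]
    refine ih _ (pvInsert_good x acc hpw (fun p hp => hcross p hp x List.mem_cons_self)) htl ?_
    intro p hp q hq
    rcases (PySem.List.mem_insertBy _ x p acc).mp hp with hp | hp
    · subst hp; exact hxl q hq
    · exact hcross p hp q (by simp [hq])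

theorem pvInsert_map_fst (x : String × Nat) (acc : List (String × Nat)) :
    (PySem.List.insertBy (fun a b => decide (pvHandKey b.1 < pvHandKey a.1)) x acc).map Prod.fst =
      PySem.List.insertBy (fun a b => decide (pvHandKey b < pvHandKey a)) x.1 (acc.map Prod.fst) := by
  induction acc with
  | nil => simp [PySem.List.insertBy]
  | cons y ys ih =>
    simp only [List.map_cons]
    simp only [PySem.List.insertBy]
    by_cases hc : decide (pvHandKey y.1 < pvHandKey x.1) = true
    · simp [hc]
    · simp [hc, ih]

theorem pvFoldl_map_fst (l acc : List (String × Nat)) :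
    (l.foldl (fun acc x =>
        PySem.List.insertBy (fun a b => decide (pvHandKey b.1 < pvHandKey a.1)) x acc) acc).map Prod.fst =
      (l.map Prod.fst).foldl (fun acc x =>
        PySem.List.insertBy (fun a b => decide (pvHandKey b < pvHandKey a)) x acc) (acc.map Prod.fst) := by
  induction l generalizing acc with
  | nil => simp
  | cons x t ih =>
    simp only [List.foldl_cons, List.map_cons, ih, pvInsert_map_fst]

theorem pvZipIdx_pairwise (xs : List String) (k : Nat) :
    (xs.zipIdx k).Pairwise (fun p q => p.2 < q.2) := by
  induction xs generalizing k with
  | nil => simp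
  | cons x t ih =>
    rw [List.zipIdx_cons]
    refine List.Pairwise.cons ?_ (ih (k + 1))
    intro q hq
    have := List.le_snd_of_mem_zipIdx hq
    simpa using by omega


-- ===== VERDICT (by name: the statement is the Claim_ definition above) =====
theorem sort_hands_spec : Claim_equal_sort_hands := by
  intro hands _ hpre
  obtain ⟨hne, hpref⟩ := hpre
  unfold Spec_sort_hands
  have hCpw : hands.zipIdx.Pairwise pvC := by
    refine List.Pairwise.imp ?_ (pvZipIdx_pairwise_rel _ hands hpref 0)
    intro p q h
    unfold pvC hand_2_better pvCmp
    exact pvH2bLoop_eq_lt p.1.toList q.1.toList h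
  have hA : sort_hands hands = (pvILoop hands.zipIdx hands.length).map Prod.fst := by
    have h1 := pvILoop_sim hands.length hands.zipIdx hCpw
    rw [List.zipIdx_map_fst] at h1
    exact h1
  have hSt : pvSt hands.zipIdx := by
    unfold pvSt
    refine List.Pairwise.imp ?_ (pvZipIdx_pairwise hands 0)
    intro a b h _
    exact h
  have hApw : (pvILoop hands.zipIdx hands.length).Pairwise pvGood := by
    have h1 := pvILoop_sorted hands.length hands.zipIdx [] (by simp) hSt (by simp) (by simp)
    simpa using h1
  have hAperm : (pvILoop hands.zipIdx hands.length).Perm hands.zipIdx := pvILoop_perm _ _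
  have hBfold := PySem.List.sorted_rev_eq_foldl_insertBy hands.zipIdx (fun p => pvHandKey p.1)
  have hB : sort_hands_alt hands =
      ((hands.zipIdx).foldl (fun acc x =>
        PySem.List.insertBy (fun a b => decide (pvHandKey b.1 < pvHandKey a.1)) x acc) []).map Prod.fst := by
    unfold sort_hands_alt
    rw [PySem.List.sorted_rev_eq_foldl_insertBy hands pvHandKey]
    have h1 := pvFoldl_map_fst hands.zipIdx []
    rw [List.zipIdx_map_fst] at h1
    simpa using h1.symm
  have hBpw : ((hands.zipIdx).foldl (fun acc x =>
      PySem.List.insertBy (fun a b => decide (pvHandKey b.1 < pvHandKey a.1)) x acc) []).Pairwise pvGood :=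
    pvFoldl_good hands.zipIdx [] (by simp) (pvZipIdx_pairwise hands 0) (by simp)
  have hBperm : ((hands.zipIdx).foldl (fun acc x =>
      PySem.List.insertBy (fun a b => decide (pvHandKey b.1 < pvHandKey a.1)) x acc) []).Perm hands.zipIdx := by
    have h1 := PySem.List.sorted_perm hands.zipIdx (fun p => pvHandKey p.1) true
    rwa [hBfold] at h1
  have heq : pvILoop hands.zipIdx hands.length =
      (hands.zipIdx).foldl (fun acc x =>
        PySem.List.insertBy (fun a b => decide (pvHandKey b.1 < pvHandKey a.1)) x acc) [] :=
    List.Perm.eq_of_pairwise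
      (fun a b _ _ h1 h2 => (pvGood_asymm h1 h2).elim)
      hApw hBpw (hAperm.trans hBperm.symm)
  rw [hA, heq, hB]
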